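-- pv_equiv track=rewrite | github.com/hubert-leterme/wcnn | wcnn/cnn/cnn_toolbox.py | merge_sections
-- ===== SOURCE A (Python) =====
-- def merge_sections(split_sections, types):
--
--     split_sections0 = []
--     types0 = []
--     for outsec, wch in zip(split_sections, types):
--         try:
--             isnewtype = (wch != types0[-1])
--         except IndexError:
--             isnewtype = True
--         if isnewtype:
--             split_sections0.append(0)
--             types0.append(wch)
--         split_sections0[-1] += outsec
--
--     return split_sections0, types0
-- ===== SOURCE B (Python) =====
-- def merge_sections(split_sections, types):
--     pairs = list(zip(split_sections, types))
--     n = len(pairs)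
--     split_sections0 = []
--     types0 = []
--     i = 0
--     while i < n:
--         t = pairs[i][1]
--         total = 0
--         while i < n and pairs[i][1] == t:
--             total += pairs[i][0]
--             i += 1
--         split_sections0.append(total)
--         types0.append(t)
--     return split_sections0, types0
-- ===== Notes on version B (the rewrite author's own statement) =====
-- stated objective: alternative
-- what changed: B splits the zipped input into maximal runs of equal type (outer loop per run, inner loop summing the run) instead of A's element-wise pass that tests the last emitted type and mutates the last accumulator cell.
import Mathlib
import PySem

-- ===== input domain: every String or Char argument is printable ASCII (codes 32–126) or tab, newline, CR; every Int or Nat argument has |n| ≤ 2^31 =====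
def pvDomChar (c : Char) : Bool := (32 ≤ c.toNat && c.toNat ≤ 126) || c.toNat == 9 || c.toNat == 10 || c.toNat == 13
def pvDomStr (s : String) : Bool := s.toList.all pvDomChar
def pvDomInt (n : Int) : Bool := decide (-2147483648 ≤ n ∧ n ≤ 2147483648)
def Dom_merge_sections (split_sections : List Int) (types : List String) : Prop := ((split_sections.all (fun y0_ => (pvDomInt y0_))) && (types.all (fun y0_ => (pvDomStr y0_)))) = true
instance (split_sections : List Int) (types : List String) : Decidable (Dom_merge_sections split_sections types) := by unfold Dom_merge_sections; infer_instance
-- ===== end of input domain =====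

-- B merges maximal runs of equal type by an outer loop per run with an inner run-summing loop,
-- instead of A's element-wise pass testing the last emitted type; alternative decomposition, same cost.

-- ===== PORT A =====
-- A's loop over zip(split_sections, types); the two output lists are kept reversed
-- (head = Python's [-1]) so 'append' and 'split_sections0[-1] += outsec' act on the head;
-- they are reversed back at the end.
def pvStepA (acc : List Int × List String) (p : Int × String) : List Int × List String :=
  -- isnewtype: types0[-1] raises IndexError iff types0 is empty → True
  let isnewtype : Bool := match acc.2 with
    | [] => true
    | t :: _ => p.2 != t
  let acc' := if isnewtype then ((0 : Int) :: acc.1, p.2 :: acc.2) else acc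
  match acc'.1 with
  | [] => acc'           -- unreachable: after the branch the list is nonempty
  | x :: xs => ((x + p.1) :: xs, acc'.2)

def merge_sections (split_sections : List Int) (types : List String) : List Int × List String :=
  let r := (split_sections.zip types).foldl pvStepA ([], [])
  (r.1.reverse, r.2.reverse)

-- ===== PORT B =====
-- one recursive step per maximal run: consume the run of the head's type, sum it, recurse on the rest
def pvGoB : List (Int × String) → List Int × List String
  | [] => ([], [])
  | (s, t) :: l =>
    let run := l.takeWhile (fun p => p.2 == t)
    let rest := l.dropWhile (fun p => p.2 == t)
    let r := pvGoB rest
    ((s + (run.map Prod.fst).sum) :: r.1, t :: r.2)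
termination_by l => l.length
decreasing_by
  exact Nat.lt_succ_of_le (List.length_dropWhile_le _ _)

def merge_sections_alt (split_sections : List Int) (types : List String) : List Int × List String :=
  pvGoB (split_sections.zip types)

-- ===== PRECONDITION & SPEC =====
def Spec_merge_sections (split_sections : List Int) (types : List String) (out : List Int × List String) : Prop := out = merge_sections_alt split_sections types
instance (split_sections : List Int) (types : List String) (out : List Int × List String) : Decidable (Spec_merge_sections split_sections types out) := by unfold Spec_merge_sections; infer_instance

-- ===== CLAIM (what is proved, stated in full; the proofs are below) =====
def Claim_equal_merge_sections : Prop := ∀ (split_sections : List Int) (types : List String), Dom_merge_sections split_sections types → Spec_merge_sections split_sections types (merge_sections split_sections types)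

-- ===== LEMMAS AND PROOFS =====

-- main invariant: running A's fold from a nonempty state equals B's merge of the virtual
-- list (s,t)::l, reversed onto the accumulators
theorem pvFold_eq_goB (n : Nat) : ∀ (l : List (Int × String)), l.length ≤ n →
    ∀ (s : Int) (t : String) (ss : List Int) (ts : List String),
    l.foldl pvStepA (s :: ss, t :: ts) =
      ((pvGoB ((s, t) :: l)).1.reverse ++ ss, (pvGoB ((s, t) :: l)).2.reverse ++ ts) := by
  induction n with
  | zero =>
    intro l hl s t ss ts
    have : l = [] := List.eq_nil_of_length_eq_zero (Nat.le_zero.mp hl)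
    subst this
    simp [pvGoB.eq_def]
  | succ n ih =>
    intro l hl s t ss ts
    cases l with
    | nil => simp [pvGoB.eq_def]
    | cons p l2 =>
      obtain ⟨s', t'⟩ := p
      by_cases h : t' = t
      · subst h
        have hstep : pvStepA (s :: ss, t' :: ts) (s', t') = ((s + s') :: ss, t' :: ts) := by
          simp [pvStepA]
        have hlen : l2.length ≤ n := Nat.le_of_succ_le_succ hl
        have hrec := ih l2 hlen (s + s') t' ss ts
        have hgo : pvGoB ((s, t') :: (s', t') :: l2) =
            (((s + s') + ((l2.takeWhile (fun p => p.2 == t')).map Prod.fst).sum) ::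
              (pvGoB (l2.dropWhile (fun p => p.2 == t'))).1,
             t' :: (pvGoB (l2.dropWhile (fun p => p.2 == t'))).2) := by
          rw [pvGoB.eq_def]
          simp [List.takeWhile, List.dropWhile]
          ring
        have hgo2 : pvGoB ((s + s', t') :: l2) =
            (((s + s') + ((l2.takeWhile (fun p => p.2 == t')).map Prod.fst).sum) ::
              (pvGoB (l2.dropWhile (fun p => p.2 == t'))).1,
             t' :: (pvGoB (l2.dropWhile (fun p => p.2 == t'))).2) := by
          rw [pvGoB.eq_def]
        calc ((s', t') :: l2).foldl pvStepA (s :: ss, t' :: ts)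
            = l2.foldl pvStepA ((s + s') :: ss, t' :: ts) := by
              simp [List.foldl_cons, hstep]
          _ = ((pvGoB ((s + s', t') :: l2)).1.reverse ++ ss,
               (pvGoB ((s + s', t') :: l2)).2.reverse ++ ts) := hrec
          _ = ((pvGoB ((s, t') :: (s', t') :: l2)).1.reverse ++ ss,
               (pvGoB ((s, t') :: (s', t') :: l2)).2.reverse ++ ts) := by
              rw [hgo, hgo2]
      · have hstep : pvStepA (s :: ss, t :: ts) (s', t') = (s' :: s :: ss, t' :: t :: ts) := by
          simp [pvStepA, h]
        have hlen : l2.length ≤ n := Nat.le_of_succ_le_succ hl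
        have hrec := ih l2 hlen s' t' (s :: ss) (t :: ts)
        have hgo : pvGoB ((s, t) :: (s', t') :: l2) =
            (s :: (pvGoB ((s', t') :: l2)).1, t :: (pvGoB ((s', t') :: l2)).2) := by
          have hb : (t' == t) = false := beq_eq_false_iff_ne.mpr h
          conv_lhs => rw [pvGoB.eq_def]
          simp [List.takeWhile, List.dropWhile, hb]
        calc ((s', t') :: l2).foldl pvStepA (s :: ss, t :: ts)
            = l2.foldl pvStepA (s' :: s :: ss, t' :: t :: ts) := by
              simp [List.foldl_cons, hstep]
          _ = ((pvGoB ((s', t') :: l2)).1.reverse ++ (s :: ss),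
               (pvGoB ((s', t') :: l2)).2.reverse ++ (t :: ts)) := hrec
          _ = ((pvGoB ((s, t) :: (s', t') :: l2)).1.reverse ++ ss,
               (pvGoB ((s, t) :: (s', t') :: l2)).2.reverse ++ ts) := by
              rw [hgo]; simp

-- ===== VERDICT (by name: the statement is the Claim_ definition above) =====
theorem merge_sections_spec : Claim_equal_merge_sections := by
  intro split_sections types _
  unfold Spec_merge_sections merge_sections merge_sections_alt
  cases hz : split_sections.zip types with
  | nil => simp [pvGoB.eq_def]
  | cons p l =>
    obtain ⟨s, t⟩ := p
    have hstep0 : pvStepA ([], []) (s, t) = ([s], [t]) := by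
      simp [pvStepA]
    have := pvFold_eq_goB l.length l (le_refl _) s t [] []
    simp only [List.foldl_cons, hstep0]
    rw [this]
    simp
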